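-- pv_equiv track=rewrite | github.com/omarabb315/VSC22-Submission | prepare_data.py | split_vcdb_to_query_ref
-- ===== SOURCE A (Python) =====
-- def split_vcdb_to_query_ref(vcdb_videos, max_videos=None):
--     """
--     Split VCDB videos into query and reference sets.
--     Strategy: for each group, the first video is the 'reference',
--     the rest are 'queries' (potential copies).
--     """
--     groups = {}
--     for group_name, video_path in vcdb_videos:
--         groups.setdefault(group_name, []).append(video_path)
--
--     ref_videos = []
--     query_videos = []
--
--     for group_name in sorted(groups.keys()):
--         vids = groups[group_name]
--         ref_videos.append(vids[0])
--         query_videos.extend(vids[1:])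
--
--     if max_videos:
--         half = max(max_videos // 2, 1)
--         ref_videos = ref_videos[:half]
--         query_videos = query_videos[:half]
--
--     return query_videos, ref_videos
-- ===== SOURCE B (Python) =====
-- def split_vcdb_to_query_ref(vcdb_videos, max_videos=None):
--     """Same split, without building a dict: sorted set of group names,
--     then per-group filter comprehensions."""
--     keys = sorted({g for g, _ in vcdb_videos})
--     per_key = [[v for g, v in vcdb_videos if g == k] for k in keys]
--     ref_videos = [vids[0] for vids in per_key]
--     query_videos = [v for vids in per_key for v in vids[1:]]
--     if max_videos:
--         half = max(max_videos // 2, 1)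
--         ref_videos = ref_videos[:half]
--         query_videos = query_videos[:half]
--     return query_videos, ref_videos
-- ===== Notes on version B (the rewrite author's own statement) =====
-- stated objective: simpler
-- what changed: Replaces the mutable dict-grouping loop plus accumulator loop with four comprehensions: a sorted set of group names, a per-group filter, and direct map/flatten builds of the two lists.
import Mathlib
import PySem

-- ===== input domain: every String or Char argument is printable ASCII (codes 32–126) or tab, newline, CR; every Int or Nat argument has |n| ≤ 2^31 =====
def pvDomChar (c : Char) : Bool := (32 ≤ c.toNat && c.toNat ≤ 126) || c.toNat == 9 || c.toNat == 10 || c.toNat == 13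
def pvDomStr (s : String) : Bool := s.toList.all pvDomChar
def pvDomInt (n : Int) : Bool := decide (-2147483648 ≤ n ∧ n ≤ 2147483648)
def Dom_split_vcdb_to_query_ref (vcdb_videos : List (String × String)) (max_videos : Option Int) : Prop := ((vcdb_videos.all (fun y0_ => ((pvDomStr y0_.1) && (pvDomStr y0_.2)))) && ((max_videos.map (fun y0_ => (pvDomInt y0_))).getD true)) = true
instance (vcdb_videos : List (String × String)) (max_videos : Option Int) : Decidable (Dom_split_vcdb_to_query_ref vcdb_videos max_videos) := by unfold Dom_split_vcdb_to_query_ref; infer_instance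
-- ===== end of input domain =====

-- B replaces A's dict-grouping + accumulator loops with comprehensions over the
-- sorted set of group names (simpler decomposition, not claimed faster).

-- ===== PORT A =====
-- groups.setdefault(g, []).append(v)  =  d[g] = d.get(g, []) + [v], i.e. Dict.modify g [] (· ++ [v])
def split_vcdb_to_query_ref (vcdb_videos : List (String × String)) (max_videos : Option Int) : List String × List String :=
  let groups : PySem.Dict String (List String) :=
    vcdb_videos.foldl (fun d p => d.modify p.1 [] (· ++ [p.2])) PySem.Dict.empty
  let rq : List String × List String :=
    (PySem.List.sorted groups.keys (fun x => x) false).foldl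
      (fun acc group_name =>
        let vids := groups.getD group_name []
        -- vids[0]: pyGetD is exact here (vids is nonempty for every key of groups)
        (acc.1 ++ [PySem.List.pyGetD vids 0 ""], acc.2 ++ PySem.List.slice vids (some 1) none))
      ([], [])
  let ref_videos := rq.1
  let query_videos := rq.2
  match max_videos with
  | none => (query_videos, ref_videos)
  | some m =>
    if m ≠ 0 then
      let half := max (PySem.Int.floordiv m 2) 1
      (PySem.List.slice query_videos none (some half), PySem.List.slice ref_videos none (some half))
    else (query_videos, ref_videos)

-- ===== PORT B =====
def split_vcdb_to_query_ref_alt (vcdb_videos : List (String × String)) (max_videos : Option Int) : List String × List String :=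
  let keys := PySem.List.sorted (PySem.Set.ofList (vcdb_videos.map Prod.fst)) (fun x => x) false
  let per_key := keys.map (fun k => (vcdb_videos.filter (fun p => p.1 == k)).map Prod.snd)
  -- vids[0]: pyGetD is exact here (every vids in per_key is nonempty)
  let ref_videos := per_key.map (fun vids => PySem.List.pyGetD vids 0 "")
  let query_videos := per_key.flatMap (fun vids => PySem.List.slice vids (some 1) none)
  match max_videos with
  | none => (query_videos, ref_videos)
  | some m =>
    if m ≠ 0 then
      let half := max (PySem.Int.floordiv m 2) 1
      (PySem.List.slice query_videos none (some half), PySem.List.slice ref_videos none (some half))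
    else (query_videos, ref_videos)

-- ===== PRECONDITION & SPEC =====
def Spec_split_vcdb_to_query_ref (vcdb_videos : List (String × String)) (max_videos : Option Int) (out : List String × List String) : Prop := out = split_vcdb_to_query_ref_alt vcdb_videos max_videos
instance (vcdb_videos : List (String × String)) (max_videos : Option Int) (out : List String × List String) : Decidable (Spec_split_vcdb_to_query_ref vcdb_videos max_videos out) := by unfold Spec_split_vcdb_to_query_ref; infer_instance

-- ===== CLAIM (what is proved, stated in full; the proofs are below) =====
def Claim_equal_split_vcdb_to_query_ref : Prop := ∀ (vcdb_videos : List (String × String)) (max_videos : Option Int), Dom_split_vcdb_to_query_ref vcdb_videos max_videos → Spec_split_vcdb_to_query_ref vcdb_videos max_videos (split_vcdb_to_query_ref vcdb_videos max_videos)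

-- ===== LEMMAS AND PROOFS =====

-- A fold that appends one element to .1 and a block to .2 is (map, flatMap).
theorem pv_foldl_pair (ks : List String) (f : String → String) (g : String → List String)
    (acc : List String × List String) :
    ks.foldl (fun acc k => (acc.1 ++ [f k], acc.2 ++ g k)) acc
      = (acc.1 ++ ks.map f, acc.2 ++ ks.flatMap g) := by
  induction ks generalizing acc with
  | nil => simp
  | cons k ks ih => simp [List.foldl_cons, ih]

theorem split_vcdb_to_query_ref_spec : Claim_equal_split_vcdb_to_query_ref := by
  intro vcdb_videos max_videos _
  show _ = _
  unfold split_vcdb_to_query_ref split_vcdb_to_query_ref_alt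
  have hkeys :
      (vcdb_videos.foldl (fun d p => d.modify p.1 [] (· ++ [p.2]))
        (PySem.Dict.empty : PySem.Dict String (List String))).keys
        = PySem.Set.ofList (vcdb_videos.map Prod.fst) := by
    rw [PySem.Dict.keys_foldl_modify_key]
    simp [PySem.Dict.keys_empty, PySem.Set.ofList_eq_foldl, PySem.Set.update]
  have hgetD : ∀ k,
      (vcdb_videos.foldl (fun d p => d.modify p.1 [] (· ++ [p.2]))
        (PySem.Dict.empty : PySem.Dict String (List String))).getD k []
        = (vcdb_videos.filter (fun p => p.1 == k)).map Prod.snd := by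
    intro k
    rw [PySem.Dict.getD_foldl_modify_append]
    simp [PySem.Dict.getD_empty]
  simp only [hkeys, hgetD, pv_foldl_pair, List.nil_append, List.flatMap_map, List.map_map, Function.comp_def]
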